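-- pv_equiv track=rewrite | github.com/irhooshyar/standard | abdal_crawlers/crawler-divan-edalat/extract/legislation.py | detect_uksi_type
-- ===== SOURCE A (Python) =====
-- uksi = [
--     "Order",
--     "Regulations",
--     "Rules",
--     "Scheme",
--     "Direction",
--     "Declaration",
-- ]
--
-- def detect_uksi_type(title: str):
--     title = title.lower()
--     title = title.replace("order of council", "", len(title))
--     indices = []
--     for uksi_ in uksi:
--         indices.append(title.rfind(uksi_.lower()))
--     max_ = indices.index(max(indices))
--     if max(indices) == -1:
--         return "unknown"
--     return uksi[max_]
-- ===== SOURCE B (Python) =====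
-- uksi = [
--     "Order",
--     "Regulations",
--     "Rules",
--     "Scheme",
--     "Direction",
--     "Declaration",
-- ]
--
-- def detect_uksi_type(title: str):
--     title = title.lower()
--     title = title.replace("order of council", "", len(title))
--     # scan the title right-to-left; the first position where some keyword starts
--     # is the rightmost keyword occurrence (keyword-list order breaks ties)
--     for pos in range(len(title) - 1, -1, -1):
--         for kw in uksi:
--             if title.startswith(kw.lower(), pos):
--                 return kw
--     return "unknown"
-- ===== Notes on version B (the rewrite author's own statement) =====
-- stated objective: alternative
-- what changed: Instead of computing rfind for every keyword and then selecting the maximum via max/list.index, B scans the (lowercased, 'order of council'-stripped) title right-to-left position by position and returns at the first position where any keyword starts (keywords checked in list order, which reproduces A's tie-break), falling through to the same fallback value when no keyword occurs.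
import Mathlib
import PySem

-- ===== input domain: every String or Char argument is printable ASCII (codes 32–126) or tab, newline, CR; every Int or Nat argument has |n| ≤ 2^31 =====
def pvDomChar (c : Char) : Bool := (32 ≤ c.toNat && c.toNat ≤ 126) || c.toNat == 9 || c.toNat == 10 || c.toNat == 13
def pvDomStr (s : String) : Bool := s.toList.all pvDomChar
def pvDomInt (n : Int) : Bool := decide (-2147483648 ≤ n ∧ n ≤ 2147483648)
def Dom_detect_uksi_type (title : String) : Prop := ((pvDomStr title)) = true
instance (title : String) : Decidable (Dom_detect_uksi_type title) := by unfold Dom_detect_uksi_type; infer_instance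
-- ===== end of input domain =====

-- B replaces A's per-keyword rfind + max/list.index selection by a single right-to-left
-- scan over the title that returns at the first position where any keyword starts
-- (keyword-list order breaks ties); same return value everywhere.

-- the module-level constant `uksi` shared by both Python versions
def uksiA : List String := ["Order", "Regulations", "Rules", "Scheme", "Direction", "Declaration"]

-- ===== PORT A =====
-- Python's title.replace(old, "", len(title)): the count len(title) always exceeds the
-- number of occurrences of the 16-char pattern, so it is exactly replace-all.
def detect_uksi_type (title : String) : String :=
  let t := PySem.Str.lower title
  let t2 := PySem.Str.replace t "order of council" ""
  let indices := uksiA.foldl (fun acc u => acc ++ [PySem.Str.rfind t2 (PySem.Str.lower u)]) []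
  let mx := (PySem.List.max? indices (fun x => x)).getD (-1)   -- indices nonempty: getD unreachable
  let max_ := (PySem.List.index? indices mx).getD 0            -- mx ∈ indices: getD unreachable
  if mx = -1 then "unknown"
  else (PySem.List.pyGet? uksiA (max_ : Int)).getD ""          -- max_ < 6: getD unreachable

-- ===== PORT B =====
-- `title.startswith(kw.lower(), pos)` for 0 ≤ pos is exactly: kw.lower() is a prefix of title[pos:]
def bKwAt (t : List Char) (i : Nat) : Option String :=
  uksiA.find? (fun kw => (PySem.Str.lower kw).toList.isPrefixOf (t.drop i))

-- the loop `for pos in range(len(title)-1, -1, -1)` with its early return;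
-- `bScan t n` inspects positions n, n-1, …, 0
def bScan (t : List Char) : Nat → String
  | 0 => match bKwAt t 0 with
         | some kw => kw
         | none => "unknown"
  | n+1 => match bKwAt t (n+1) with
           | some kw => kw
           | none => bScan t n

def detect_uksi_type_alt (title : String) : String :=
  let t := PySem.Str.replace (PySem.Str.lower title) "order of council" ""
  match t.toList.length with
  | 0 => "unknown"              -- range(len-1, -1, -1) is empty
  | m+1 => bScan t.toList m

-- ===== PRECONDITION & SPEC =====
def Spec_detect_uksi_type (title : String) (out : String) : Prop := out = detect_uksi_type_alt title
instance (title : String) (out : String) : Decidable (Spec_detect_uksi_type title out) := by unfold Spec_detect_uksi_type; infer_instance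

-- ===== CLAIM (what is proved, stated in full; the proofs are below) =====
def Claim_equal_detect_uksi_type : Prop := ∀ (title : String), Dom_detect_uksi_type title → Spec_detect_uksi_type title (detect_uksi_type title)

-- ===== LEMMAS AND PROOFS =====

-- the selection A's max/index machinery performs, written as a plain if-chain
def pvSel (g0 g1 g2 g3 g4 g5 : Int) : String :=
  let M := max (max (max (max (max g0 g1) g2) g3) g4) g5
  if M = -1 then "unknown"
  else if g0 = M then "Order"
  else if g1 = M then "Regulations"
  else if g2 = M then "Rules"
  else if g3 = M then "Scheme"
  else if g4 = M then "Direction"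
  else "Declaration"

/-- `rfind.go` returns `-1` or a nonnegative index. -/
lemma pv_rfind_go_neg_one_le (s sub : List Char) (n : ℕ) : -1 ≤ PySem.Chars.rfind.go s sub n := by
  induction n with
  | zero => unfold PySem.Chars.rfind.go; split <;> omega
  | succ j ih =>
    unfold PySem.Chars.rfind.go
    split <;> [omega; exact ih]

/-- `rfind.go` never exceeds its starting position. -/
lemma pv_rfind_go_le (s sub : List Char) (n : ℕ) : PySem.Chars.rfind.go s sub n ≤ (n : Int) := by
  induction n with
  | zero => unfold PySem.Chars.rfind.go; split <;> omega
  | succ j ih =>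
    unfold PySem.Chars.rfind.go
    split
    · omega
    · have := pv_rfind_go_neg_one_le s sub j
      omega

lemma pv_go_zero (s sub : List Char) :
    PySem.Chars.rfind.go s sub 0 = if sub.isPrefixOf s then 0 else -1 := rfl

lemma pv_go_succ (s sub : List Char) (j : ℕ) :
    PySem.Chars.rfind.go s sub (j+1) =
      if sub.isPrefixOf (s.drop (j+1)) then ((j+1 : ℕ) : Int) else PySem.Chars.rfind.go s sub j := rfl

-- pvSel picks the stated keyword when the indicated value is the strict maximum-from-the-left
lemma pvSel_pick0 (g0 g1 g2 g3 g4 g5 p : Int) (hp : 0 ≤ p) (h0 : g0 = p)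
    (h1 : g1 ≤ p) (h2 : g2 ≤ p) (h3 : g3 ≤ p) (h4 : g4 ≤ p) (h5 : g5 ≤ p) :
    pvSel g0 g1 g2 g3 g4 g5 = "Order" := by
  unfold pvSel
  rw [if_neg (by omega), if_pos (by omega)]

lemma pvSel_pick1 (g0 g1 g2 g3 g4 g5 p : Int) (hp : 0 ≤ p) (h0 : g0 < p) (h1 : g1 = p)
    (h2 : g2 ≤ p) (h3 : g3 ≤ p) (h4 : g4 ≤ p) (h5 : g5 ≤ p) :
    pvSel g0 g1 g2 g3 g4 g5 = "Regulations" := by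
  unfold pvSel
  rw [if_neg (by omega), if_neg (by omega), if_pos (by omega)]

lemma pvSel_pick2 (g0 g1 g2 g3 g4 g5 p : Int) (hp : 0 ≤ p) (h0 : g0 < p) (h1 : g1 < p)
    (h2 : g2 = p) (h3 : g3 ≤ p) (h4 : g4 ≤ p) (h5 : g5 ≤ p) :
    pvSel g0 g1 g2 g3 g4 g5 = "Rules" := by
  unfold pvSel
  rw [if_neg (by omega), if_neg (by omega), if_neg (by omega), if_pos (by omega)]

lemma pvSel_pick3 (g0 g1 g2 g3 g4 g5 p : Int) (hp : 0 ≤ p) (h0 : g0 < p) (h1 : g1 < p)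
    (h2 : g2 < p) (h3 : g3 = p) (h4 : g4 ≤ p) (h5 : g5 ≤ p) :
    pvSel g0 g1 g2 g3 g4 g5 = "Scheme" := by
  unfold pvSel
  rw [if_neg (by omega), if_neg (by omega), if_neg (by omega), if_neg (by omega), if_pos (by omega)]

lemma pvSel_pick4 (g0 g1 g2 g3 g4 g5 p : Int) (hp : 0 ≤ p) (h0 : g0 < p) (h1 : g1 < p)
    (h2 : g2 < p) (h3 : g3 < p) (h4 : g4 = p) (h5 : g5 ≤ p) :
    pvSel g0 g1 g2 g3 g4 g5 = "Direction" := by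
  unfold pvSel
  rw [if_neg (by omega), if_neg (by omega), if_neg (by omega), if_neg (by omega),
    if_neg (by omega), if_pos (by omega)]

lemma pvSel_pick5 (g0 g1 g2 g3 g4 g5 p : Int) (hp : 0 ≤ p) (h0 : g0 < p) (h1 : g1 < p)
    (h2 : g2 < p) (h3 : g3 < p) (h4 : g4 < p) (h5 : g5 = p) :
    pvSel g0 g1 g2 g3 g4 g5 = "Declaration" := by
  unfold pvSel
  rw [if_neg (by omega), if_neg (by omega), if_neg (by omega), if_neg (by omega),
    if_neg (by omega), if_neg (by omega)]

lemma pv_neg_one_le_rfind (s sub : String) : -1 ≤ PySem.Str.rfind s sub := by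
  simpa [PySem.Str.rfind_eq, PySem.Chars.rfind] using pv_rfind_go_neg_one_le s.toList sub.toList s.toList.length

lemma pv_if_le (c : Prop) [Decidable c] (s k : List Char) (n : ℕ) :
    (if c then ((n+1 : ℕ) : Int) else PySem.Chars.rfind.go s k n) ≤ ((n+1 : ℕ) : Int) := by
  split
  · omega
  · have := pv_rfind_go_le s k n; omega

lemma pv_go_lt (s k : List Char) (n : ℕ) :
    PySem.Chars.rfind.go s k n < ((n+1 : ℕ) : Int) := by
  have := pv_rfind_go_le s k n; omega

-- the lowered keyword constants
lemma pv_l0 : (PySem.Str.lower "Order").toList = (['o', 'r', 'd', 'e', 'r'] : List Char) := by decide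
lemma pv_l1 : (PySem.Str.lower "Regulations").toList = (['r', 'e', 'g', 'u', 'l', 'a', 't', 'i', 'o', 'n', 's'] : List Char) := by decide
lemma pv_l2 : (PySem.Str.lower "Rules").toList = (['r', 'u', 'l', 'e', 's'] : List Char) := by decide
lemma pv_l3 : (PySem.Str.lower "Scheme").toList = (['s', 'c', 'h', 'e', 'm', 'e'] : List Char) := by decide
lemma pv_l4 : (PySem.Str.lower "Direction").toList = (['d', 'i', 'r', 'e', 'c', 't', 'i', 'o', 'n'] : List Char) := by decide
lemma pv_l5 : (PySem.Str.lower "Declaration").toList = (['d', 'e', 'c', 'l', 'a', 'r', 'a', 't', 'i', 'o', 'n'] : List Char) := by decide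

/-- A's selection machinery on six values is the plain if-chain `pvSel`. -/
lemma pv_key (r0 r1 r2 r3 r4 r5 : Int) (h0 : -1 ≤ r0) (h1 : -1 ≤ r1) (h2 : -1 ≤ r2)
    (h3 : -1 ≤ r3) (h4 : -1 ≤ r4) (h5 : -1 ≤ r5) :
    (if (PySem.List.max? [r0, r1, r2, r3, r4, r5] (fun x => x)).getD (-1) = -1 then "unknown"
     else (PySem.List.pyGet? uksiA
        (((PySem.List.index? [r0, r1, r2, r3, r4, r5]
            ((PySem.List.max? [r0, r1, r2, r3, r4, r5] (fun x => x)).getD (-1))).getD 0 : Nat) : Int)).getD "")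
    = pvSel r0 r1 r2 r3 r4 r5 := by
  unfold pvSel
  simp only [PySem.List.max?_id_cons, Option.getD_some,
    PySem.List.index?_eq_idxOf?, List.idxOf?, List.findIdx?_cons, List.findIdx?_nil, List.foldl]
  set A := max (max (max (max (max r0 r1) r2) r3) r4) r5 with hA
  by_cases hneg : A = -1
  · rw [if_pos hneg, if_pos hneg]
  · rw [if_neg hneg, if_neg hneg]
    by_cases e0 : r0 = A
    · rw [if_pos (beq_iff_eq.mpr e0), if_pos e0]
      decide
    · rw [if_neg (by rw [beq_eq_false_iff_ne.mpr e0]; exact Bool.false_ne_true), if_neg e0]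
      by_cases e1 : r1 = A
      · rw [if_pos (beq_iff_eq.mpr e1), if_pos e1]
        decide
      · rw [if_neg (by rw [beq_eq_false_iff_ne.mpr e1]; exact Bool.false_ne_true), if_neg e1]
        by_cases e2 : r2 = A
        · rw [if_pos (beq_iff_eq.mpr e2), if_pos e2]
          decide
        · rw [if_neg (by rw [beq_eq_false_iff_ne.mpr e2]; exact Bool.false_ne_true), if_neg e2]
          by_cases e3 : r3 = A
          · rw [if_pos (beq_iff_eq.mpr e3), if_pos e3]
            decide
          · rw [if_neg (by rw [beq_eq_false_iff_ne.mpr e3]; exact Bool.false_ne_true), if_neg e3]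
            by_cases e4 : r4 = A
            · rw [if_pos (beq_iff_eq.mpr e4), if_pos e4]
              decide
            · rw [if_neg (by rw [beq_eq_false_iff_ne.mpr e4]; exact Bool.false_ne_true), if_neg e4]
              by_cases e5 : r5 = A
              · rw [if_pos (beq_iff_eq.mpr e5)]
                decide
              · exfalso; omega

/-- B's right-to-left scan computes exactly A's selection of the `rfind.go` values. -/
lemma pv_scan (t : List Char) : ∀ n : ℕ,
    pvSel (PySem.Chars.rfind.go t (['o', 'r', 'd', 'e', 'r'] : List Char) n)
          (PySem.Chars.rfind.go t (['r', 'e', 'g', 'u', 'l', 'a', 't', 'i', 'o', 'n', 's'] : List Char) n)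
          (PySem.Chars.rfind.go t (['r', 'u', 'l', 'e', 's'] : List Char) n)
          (PySem.Chars.rfind.go t (['s', 'c', 'h', 'e', 'm', 'e'] : List Char) n)
          (PySem.Chars.rfind.go t (['d', 'i', 'r', 'e', 'c', 't', 'i', 'o', 'n'] : List Char) n)
          (PySem.Chars.rfind.go t (['d', 'e', 'c', 'l', 'a', 'r', 'a', 't', 'i', 'o', 'n'] : List Char) n)
    = bScan t n := by
  intro n
  induction n with
  | zero =>
    simp only [pv_go_zero]
    by_cases h0 : ((['o', 'r', 'd', 'e', 'r'] : List Char)).isPrefixOf t = true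
    · have hk : bKwAt t 0 = some "Order" := by
        simp only [bKwAt, uksiA, List.find?, List.drop_zero, pv_l0, pv_l1, pv_l2, pv_l3, pv_l4, pv_l5]
        simp [h0]
      have hB : bScan t 0 = "Order" := by simp only [bScan]; rw [hk]
      rw [hB, if_pos h0]
      refine pvSel_pick0 _ _ _ _ _ _ 0 ?_ ?_ ?_ ?_ ?_ ?_ ?_ <;>
        first | omega | (split <;> omega)
    ·
      by_cases h1 : ((['r', 'e', 'g', 'u', 'l', 'a', 't', 'i', 'o', 'n', 's'] : List Char)).isPrefixOf t = true
      · have hk : bKwAt t 0 = some "Regulations" := by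
          simp only [bKwAt, uksiA, List.find?, List.drop_zero, pv_l0, pv_l1, pv_l2, pv_l3, pv_l4, pv_l5]
          simp [h0, h1]
        have hB : bScan t 0 = "Regulations" := by simp only [bScan]; rw [hk]
        rw [hB, if_neg h0, if_pos h1]
        refine pvSel_pick1 _ _ _ _ _ _ 0 ?_ ?_ ?_ ?_ ?_ ?_ ?_ <;>
          first | omega | (split <;> omega)
      ·
        by_cases h2 : ((['r', 'u', 'l', 'e', 's'] : List Char)).isPrefixOf t = true
        · have hk : bKwAt t 0 = some "Rules" := by
            simp only [bKwAt, uksiA, List.find?, List.drop_zero, pv_l0, pv_l1, pv_l2, pv_l3, pv_l4, pv_l5]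
            simp [h0, h1, h2]
          have hB : bScan t 0 = "Rules" := by simp only [bScan]; rw [hk]
          rw [hB, if_neg h0, if_neg h1, if_pos h2]
          refine pvSel_pick2 _ _ _ _ _ _ 0 ?_ ?_ ?_ ?_ ?_ ?_ ?_ <;>
            first | omega | (split <;> omega)
        ·
          by_cases h3 : ((['s', 'c', 'h', 'e', 'm', 'e'] : List Char)).isPrefixOf t = true
          · have hk : bKwAt t 0 = some "Scheme" := by
              simp only [bKwAt, uksiA, List.find?, List.drop_zero, pv_l0, pv_l1, pv_l2, pv_l3, pv_l4, pv_l5]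
              simp [h0, h1, h2, h3]
            have hB : bScan t 0 = "Scheme" := by simp only [bScan]; rw [hk]
            rw [hB, if_neg h0, if_neg h1, if_neg h2, if_pos h3]
            refine pvSel_pick3 _ _ _ _ _ _ 0 ?_ ?_ ?_ ?_ ?_ ?_ ?_ <;>
              first | omega | (split <;> omega)
          ·
            by_cases h4 : ((['d', 'i', 'r', 'e', 'c', 't', 'i', 'o', 'n'] : List Char)).isPrefixOf t = true
            · have hk : bKwAt t 0 = some "Direction" := by
                simp only [bKwAt, uksiA, List.find?, List.drop_zero, pv_l0, pv_l1, pv_l2, pv_l3, pv_l4, pv_l5]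
                simp [h0, h1, h2, h3, h4]
              have hB : bScan t 0 = "Direction" := by simp only [bScan]; rw [hk]
              rw [hB, if_neg h0, if_neg h1, if_neg h2, if_neg h3, if_pos h4]
              refine pvSel_pick4 _ _ _ _ _ _ 0 ?_ ?_ ?_ ?_ ?_ ?_ ?_ <;>
                first | omega | (split <;> omega)
            ·
              by_cases h5 : ((['d', 'e', 'c', 'l', 'a', 'r', 'a', 't', 'i', 'o', 'n'] : List Char)).isPrefixOf t = true
              · have hk : bKwAt t 0 = some "Declaration" := by
                  simp only [bKwAt, uksiA, List.find?, List.drop_zero, pv_l0, pv_l1, pv_l2, pv_l3, pv_l4, pv_l5]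
                  simp [h0, h1, h2, h3, h4, h5]
                have hB : bScan t 0 = "Declaration" := by simp only [bScan]; rw [hk]
                rw [hB, if_neg h0, if_neg h1, if_neg h2, if_neg h3, if_neg h4, if_pos h5]
                refine pvSel_pick5 _ _ _ _ _ _ 0 ?_ ?_ ?_ ?_ ?_ ?_ ?_ <;>
                  first | omega | (split <;> omega)
              ·
                have hk : bKwAt t 0 = none := by
                  simp only [bKwAt, uksiA, List.find?, List.drop_zero, pv_l0, pv_l1, pv_l2, pv_l3, pv_l4, pv_l5]
                  simp [h0, h1, h2, h3, h4, h5]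
                have hB : bScan t 0 = "unknown" := by simp only [bScan]; rw [hk]
                rw [hB, if_neg h0, if_neg h1, if_neg h2, if_neg h3, if_neg h4, if_neg h5]
                decide
  | succ m ih =>
    simp only [pv_go_succ]
    by_cases h0 : ((['o', 'r', 'd', 'e', 'r'] : List Char)).isPrefixOf (t.drop (m+1)) = true
    · have hk : bKwAt t (m+1) = some "Order" := by
        simp only [bKwAt, uksiA, List.find?, List.drop_zero, pv_l0, pv_l1, pv_l2, pv_l3, pv_l4, pv_l5]
        simp [h0]
      have hB : bScan t (m+1) = "Order" := by simp only [bScan]; rw [hk]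
      rw [hB, if_pos h0]
      refine pvSel_pick0 _ _ _ _ _ _ ((m+1 : ℕ) : Int) ?_ ?_ ?_ ?_ ?_ ?_ ?_ <;>
        first | omega | exact pv_go_lt _ _ _ | exact pv_if_le _ _ _ _
    ·
      by_cases h1 : ((['r', 'e', 'g', 'u', 'l', 'a', 't', 'i', 'o', 'n', 's'] : List Char)).isPrefixOf (t.drop (m+1)) = true
      · have hk : bKwAt t (m+1) = some "Regulations" := by
          simp only [bKwAt, uksiA, List.find?, List.drop_zero, pv_l0, pv_l1, pv_l2, pv_l3, pv_l4, pv_l5]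
          simp [h0, h1]
        have hB : bScan t (m+1) = "Regulations" := by simp only [bScan]; rw [hk]
        rw [hB, if_neg h0, if_pos h1]
        refine pvSel_pick1 _ _ _ _ _ _ ((m+1 : ℕ) : Int) ?_ ?_ ?_ ?_ ?_ ?_ ?_ <;>
          first | omega | exact pv_go_lt _ _ _ | exact pv_if_le _ _ _ _
      ·
        by_cases h2 : ((['r', 'u', 'l', 'e', 's'] : List Char)).isPrefixOf (t.drop (m+1)) = true
        · have hk : bKwAt t (m+1) = some "Rules" := by
            simp only [bKwAt, uksiA, List.find?, List.drop_zero, pv_l0, pv_l1, pv_l2, pv_l3, pv_l4, pv_l5]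
            simp [h0, h1, h2]
          have hB : bScan t (m+1) = "Rules" := by simp only [bScan]; rw [hk]
          rw [hB, if_neg h0, if_neg h1, if_pos h2]
          refine pvSel_pick2 _ _ _ _ _ _ ((m+1 : ℕ) : Int) ?_ ?_ ?_ ?_ ?_ ?_ ?_ <;>
            first | omega | exact pv_go_lt _ _ _ | exact pv_if_le _ _ _ _
        ·
          by_cases h3 : ((['s', 'c', 'h', 'e', 'm', 'e'] : List Char)).isPrefixOf (t.drop (m+1)) = true
          · have hk : bKwAt t (m+1) = some "Scheme" := by
              simp only [bKwAt, uksiA, List.find?, List.drop_zero, pv_l0, pv_l1, pv_l2, pv_l3, pv_l4, pv_l5]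
              simp [h0, h1, h2, h3]
            have hB : bScan t (m+1) = "Scheme" := by simp only [bScan]; rw [hk]
            rw [hB, if_neg h0, if_neg h1, if_neg h2, if_pos h3]
            refine pvSel_pick3 _ _ _ _ _ _ ((m+1 : ℕ) : Int) ?_ ?_ ?_ ?_ ?_ ?_ ?_ <;>
              first | omega | exact pv_go_lt _ _ _ | exact pv_if_le _ _ _ _
          ·
            by_cases h4 : ((['d', 'i', 'r', 'e', 'c', 't', 'i', 'o', 'n'] : List Char)).isPrefixOf (t.drop (m+1)) = true
            · have hk : bKwAt t (m+1) = some "Direction" := by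
                simp only [bKwAt, uksiA, List.find?, List.drop_zero, pv_l0, pv_l1, pv_l2, pv_l3, pv_l4, pv_l5]
                simp [h0, h1, h2, h3, h4]
              have hB : bScan t (m+1) = "Direction" := by simp only [bScan]; rw [hk]
              rw [hB, if_neg h0, if_neg h1, if_neg h2, if_neg h3, if_pos h4]
              refine pvSel_pick4 _ _ _ _ _ _ ((m+1 : ℕ) : Int) ?_ ?_ ?_ ?_ ?_ ?_ ?_ <;>
                first | omega | exact pv_go_lt _ _ _ | exact pv_if_le _ _ _ _
            ·
              by_cases h5 : ((['d', 'e', 'c', 'l', 'a', 'r', 'a', 't', 'i', 'o', 'n'] : List Char)).isPrefixOf (t.drop (m+1)) = true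
              · have hk : bKwAt t (m+1) = some "Declaration" := by
                  simp only [bKwAt, uksiA, List.find?, List.drop_zero, pv_l0, pv_l1, pv_l2, pv_l3, pv_l4, pv_l5]
                  simp [h0, h1, h2, h3, h4, h5]
                have hB : bScan t (m+1) = "Declaration" := by simp only [bScan]; rw [hk]
                rw [hB, if_neg h0, if_neg h1, if_neg h2, if_neg h3, if_neg h4, if_pos h5]
                refine pvSel_pick5 _ _ _ _ _ _ ((m+1 : ℕ) : Int) ?_ ?_ ?_ ?_ ?_ ?_ ?_ <;>
                  first | omega | exact pv_go_lt _ _ _ | exact pv_if_le _ _ _ _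
              ·
                have hk : bKwAt t (m+1) = none := by
                  simp only [bKwAt, uksiA, List.find?, List.drop_zero, pv_l0, pv_l1, pv_l2, pv_l3, pv_l4, pv_l5]
                  simp [h0, h1, h2, h3, h4, h5]
                have hB : bScan t (m+1) = bScan t m := by simp only [bScan]; rw [hk]
                rw [hB, if_neg h0, if_neg h1, if_neg h2, if_neg h3, if_neg h4, if_neg h5]
                exact ih

/-- A nonempty pattern is no prefix of the empty list. -/
lemma pv_isPrefixOf_nil (k : List Char) (hk : k ≠ []) : k.isPrefixOf ([] : List Char) = false := by
  cases k with
  | nil => exact absurd rfl hk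
  | cons a l => rfl

-- ===== VERDICT (by name: the statement is the Claim_ definition above) =====
theorem detect_uksi_type_spec : Claim_equal_detect_uksi_type := by
  intro title _
  unfold Spec_detect_uksi_type
  simp only [detect_uksi_type, detect_uksi_type_alt]
  set t := PySem.Str.replace (PySem.Str.lower title) "order of council" "" with ht
  have hidx : uksiA.foldl (fun acc u => acc ++ [PySem.Str.rfind t (PySem.Str.lower u)]) [] =
      [PySem.Str.rfind t (PySem.Str.lower "Order"), PySem.Str.rfind t (PySem.Str.lower "Regulations"),
       PySem.Str.rfind t (PySem.Str.lower "Rules"), PySem.Str.rfind t (PySem.Str.lower "Scheme"),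
       PySem.Str.rfind t (PySem.Str.lower "Direction"), PySem.Str.rfind t (PySem.Str.lower "Declaration")] := by
    simp only [uksiA, List.foldl, List.nil_append, List.cons_append]
  rw [hidx, pv_key _ _ _ _ _ _ (pv_neg_one_le_rfind _ _) (pv_neg_one_le_rfind _ _)
    (pv_neg_one_le_rfind _ _) (pv_neg_one_le_rfind _ _) (pv_neg_one_le_rfind _ _)
    (pv_neg_one_le_rfind _ _)]
  have hr : ∀ kw : String, PySem.Str.rfind t kw = PySem.Chars.rfind.go t.toList kw.toList t.toList.length := by
    intro kw; rfl
  simp only [hr, pv_l0, pv_l1, pv_l2, pv_l3, pv_l4, pv_l5]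
  cases hL : t.toList.length with
  | zero =>
    have hnil : t.toList = [] := List.length_eq_zero_iff.mp hL
    simp only [hnil, pv_go_zero]
    rw [pv_isPrefixOf_nil _ (by decide), pv_isPrefixOf_nil _ (by decide),
      pv_isPrefixOf_nil _ (by decide), pv_isPrefixOf_nil _ (by decide),
      pv_isPrefixOf_nil _ (by decide), pv_isPrefixOf_nil _ (by decide)]
    decide
  | succ m =>
    simp only [pv_go_succ]
    have hdrop : t.toList.drop (m+1) = [] := by
      rw [← hL]; exact List.drop_length
    rw [hdrop]
    rw [pv_isPrefixOf_nil _ (by decide), pv_isPrefixOf_nil _ (by decide),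
      pv_isPrefixOf_nil _ (by decide), pv_isPrefixOf_nil _ (by decide),
      pv_isPrefixOf_nil _ (by decide), pv_isPrefixOf_nil _ (by decide)]
    simp only [Bool.false_eq_true, if_false]
    exact pv_scan t.toList m
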